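-- pv_equiv track=rewrite | github.com/bencivjan/fa22_cs461_shared | Crypto/sol_3.1.6.py | WHA
-- ===== SOURCE A (Python) =====
-- def WHA(inStr: str):
--     outHash = 0
--     mask = 0x3FFFFFFF
--
--     for char in inStr:
--         byte = ord(char)
--         intermediate_value = (((byte ^ 0xCC) << 24) |
--                              ((byte ^ 0x33) << 16) |
--                              ((byte ^ 0xAA) << 8) |
--                              ( byte ^ 0x55))
--         outHash = (outHash & mask) + (intermediate_value & mask)
--     return outHash
-- ===== SOURCE B (Python) =====
-- def WHA(inStr: str):
--     mask = 0x3FFFFFFF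
--     vals = [(((byte ^ 0xCC) << 24) |
--              ((byte ^ 0x33) << 16) |
--              ((byte ^ 0xAA) << 8) |
--              (byte ^ 0x55)) & mask
--             for byte in map(ord, inStr)]
--     if not vals:
--         return 0
--     return (sum(vals[:-1]) & mask) + vals[-1]
-- ===== Notes on version B (the rewrite author's own statement) =====
-- stated objective: alternative
-- what changed: Replaces the sequential mask-then-accumulate fold by building the list of per-byte masked values once, then summing all but the last with a single final mask and adding the last value unmasked (using that & 0x3FFFFFFF is mod 2^30, which commutes with addition).
import Mathlib
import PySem

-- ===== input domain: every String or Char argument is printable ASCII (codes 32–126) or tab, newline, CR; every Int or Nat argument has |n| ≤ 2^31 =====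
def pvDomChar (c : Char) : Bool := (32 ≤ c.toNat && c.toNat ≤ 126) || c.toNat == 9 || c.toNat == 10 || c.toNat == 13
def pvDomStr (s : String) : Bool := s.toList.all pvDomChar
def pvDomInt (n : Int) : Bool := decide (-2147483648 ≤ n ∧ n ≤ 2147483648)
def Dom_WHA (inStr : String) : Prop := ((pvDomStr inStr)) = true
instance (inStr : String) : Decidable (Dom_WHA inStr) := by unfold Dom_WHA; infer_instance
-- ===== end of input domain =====

-- B replaces A's per-step mask-and-accumulate fold by one map of masked per-byte values
-- plus a single sum of all but the last value, masked once, with the last value added unmasked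
-- (objective: alternative decomposition; same cost).
-- All intermediate Python ints here are nonnegative, so Nat bitwise ops (^^^/<<</|||/&&&)
-- are exact for Python's ^ << | &.

-- ===== PORT A =====
-- intermediate_value of A (also the identical expression in B's comprehension)
def byteMix (byte : Nat) : Nat :=
  (((byte ^^^ 0xCC) <<< 24) |||
   ((byte ^^^ 0x33) <<< 16) |||
   ((byte ^^^ 0xAA) <<< 8) |||
   (byte ^^^ 0x55))

def WHA (inStr : String) : Int :=
  ((inStr.toList.foldl
      (fun outHash c => (outHash &&& 0x3FFFFFFF) + (byteMix c.toNat &&& 0x3FFFFFFF)) 0 : Nat) : Int)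

-- ===== PORT B =====
def WHA_alt (inStr : String) : Int :=
  let vals : List Nat := inStr.toList.map (fun c => byteMix c.toNat &&& 0x3FFFFFFF)
  if vals.isEmpty then 0
  else (((vals.dropLast.sum &&& 0x3FFFFFFF) + vals.getLastD 0 : Nat) : Int)

-- ===== PRECONDITION & SPEC =====
def Spec_WHA (inStr : String) (out : Int) : Prop := out = WHA_alt inStr
instance (inStr : String) (out : Int) : Decidable (Spec_WHA inStr out) := by unfold Spec_WHA; infer_instance

-- ===== CLAIM (what is proved, stated in full; the proofs are below) =====
def Claim_equal_WHA : Prop := ∀ (inStr : String), Dom_WHA inStr → Spec_WHA inStr (WHA inStr)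

-- ===== LEMMAS AND PROOFS =====

theorem mask_step (a b : Nat) : ((a &&& 0x3FFFFFFF) + b) &&& 0x3FFFFFFF = (a + b) &&& 0x3FFFFFFF := by
  have h : (0x3FFFFFFF : Nat) = 2 ^ 30 - 1 := by norm_num
  rw [h, Nat.and_two_pow_sub_one_eq_mod, Nat.and_two_pow_sub_one_eq_mod,
      Nat.and_two_pow_sub_one_eq_mod, Nat.mod_add_mod]

theorem fold_char (vs : List Nat) (h : Nat) (hne : vs ≠ []) :
    vs.foldl (fun acc v => (acc &&& 0x3FFFFFFF) + v) h
      = ((h + vs.dropLast.sum) &&& 0x3FFFFFFF) + vs.getLastD 0 := by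
  induction vs generalizing h with
  | nil => exact absurd rfl hne
  | cons v rest ih =>
    cases rest with
    | nil => simp [List.foldl]
    | cons w ws =>
      rw [List.foldl_cons, ih _ (by simp)]
      have hdl : (v :: w :: ws).dropLast = v :: (w :: ws).dropLast := by simp
      have hgl : (v :: w :: ws).getLastD 0 = (w :: ws).getLastD 0 := by simp
      rw [hdl, hgl, List.sum_cons]
      congr 1
      rw [Nat.add_assoc, mask_step]

theorem WHA_spec_aux (inStr : String) : WHA inStr = WHA_alt inStr := by
  unfold WHA WHA_alt
  cases hl : inStr.toList with
  | nil => simp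
  | cons c cs =>
    have hfold :
        (c :: cs).foldl (fun outHash ch => (outHash &&& 0x3FFFFFFF) + (byteMix ch.toNat &&& 0x3FFFFFFF)) 0
          = ((c :: cs).map (fun ch => byteMix ch.toNat &&& 0x3FFFFFFF)).foldl
              (fun acc v => (acc &&& 0x3FFFFFFF) + v) 0 := by
      rw [List.foldl_map]
    rw [hfold, fold_char _ 0 (by simp)]
    simp

-- ===== VERDICT (by name: the statement is the Claim_ definition above) =====
theorem WHA_spec : Claim_equal_WHA := by
  intro inStr _
  exact WHA_spec_aux inStr
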